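-- pv_equiv track=rewrite | github.com/jkersey/python_experiments | experiments/hit_counts.py | hit_counts
-- ===== SOURCE A (Python) =====
-- def hit_counts(arr):
--
--     count_arr = {}
--
--     for key in arr:
--         path = key.split(".")
--
--         for i in range(len(path)):
--             if ".".join(path[-i:]) in count_arr:
--                 count_arr[".".join(path[-i:])] += arr[key]
--             else:
--                 count_arr[".".join(path[-i:])] = arr[key]
--
--     return count_arr
-- ===== SOURCE B (Python) =====
-- def hit_counts(arr):
--     counts = {}
--     for key, v in arr.items():
--         counts[key] = counts.get(key, 0) + v
--         comps = key.split(".")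
--         suffix = None
--         for c in reversed(comps[1:]):
--             suffix = c if suffix is None else c + "." + suffix
--             counts[suffix] = counts.get(suffix, 0) + v
--     return counts
-- ===== Notes on version B (the rewrite author's own statement) =====
-- stated objective: alternative
-- what changed: Instead of recomputing each dotted suffix with a fresh slice-and-join per index, B walks the key's components in reverse once, maintaining the running suffix string incrementally, and updates the counter with dict.get defaulting.
import Mathlib
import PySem

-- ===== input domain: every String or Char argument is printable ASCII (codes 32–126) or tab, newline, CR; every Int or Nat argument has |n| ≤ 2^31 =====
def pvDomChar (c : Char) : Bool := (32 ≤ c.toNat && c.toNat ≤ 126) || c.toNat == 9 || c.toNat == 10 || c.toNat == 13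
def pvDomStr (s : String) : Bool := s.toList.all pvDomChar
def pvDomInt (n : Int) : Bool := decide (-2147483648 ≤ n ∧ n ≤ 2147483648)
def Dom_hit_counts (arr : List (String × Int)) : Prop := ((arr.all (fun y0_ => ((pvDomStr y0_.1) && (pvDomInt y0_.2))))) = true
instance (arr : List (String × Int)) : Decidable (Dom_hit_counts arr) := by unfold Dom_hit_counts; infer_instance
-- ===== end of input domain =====

-- B replaces A's per-index slice-and-join recomputation of each dotted suffix by a single reverse
-- walk over the key's components that maintains the running suffix string incrementally.


-- s.split(".")  (PySem.Chars.splitOn is Python's split; the separator "." is a nonempty literal, so split never raises)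
def pySplitDot (s : String) : List String :=
  (PySem.Chars.splitOn s.toList ['.']).map String.ofList

-- the parameter is a Python dict: build it from the association list exactly as dict(arr) does
def pyDictOf (arr : List (String × Int)) : PySem.Dict String Int :=
  arr.foldl (fun d p => d.insert p.1 p.2) PySem.Dict.empty

-- ===== PORT A =====
def hit_counts (arr : List (String × Int)) : List (String × Int) :=
  let d := pyDictOf arr
  let count_arr := d.items.foldl (fun count_arr kv =>
    let path := pySplitDot kv.1
    (PySem.List.pyRange 0 (path.length : Int)).foldl (fun count_arr i =>
      let s := PySem.Str.join "." (PySem.List.slice path (some (-i)) none)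
      if count_arr.contains s then
        count_arr.insert s (count_arr.getD s 0 + d.getD kv.1 0)   -- count_arr[s] += arr[key]
      else
        count_arr.insert s (d.getD kv.1 0)) count_arr) PySem.Dict.empty
  count_arr.items

-- ===== PORT B =====
def hit_counts_alt (arr : List (String × Int)) : List (String × Int) :=
  let d := pyDictOf arr
  let counts := d.items.foldl (fun counts kv =>
    let v := kv.2
    let counts := counts.insert kv.1 (counts.getD kv.1 0 + v)
    let comps := pySplitDot kv.1
    ((PySem.List.slice comps (some 1) none).reverse.foldl
      (fun (st : PySem.Dict String Int × Option String) c =>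
        let suffix := match st.2 with | none => c | some s0 => c ++ "." ++ s0
        (st.1.insert suffix (st.1.getD suffix 0 + v), some suffix))
      (counts, none)).1) PySem.Dict.empty
  counts.items

-- ===== PRECONDITION & SPEC =====
def Spec_hit_counts (arr : List (String × Int)) (out : List (String × Int)) : Prop := out = hit_counts_alt arr
instance (arr : List (String × Int)) (out : List (String × Int)) : Decidable (Spec_hit_counts arr out) := by unfold Spec_hit_counts; infer_instance

-- ===== CLAIM (what is proved, stated in full; the proofs are below) =====
def Claim_equal_hit_counts : Prop := ∀ (arr : List (String × Int)), Dom_hit_counts arr → Spec_hit_counts arr (hit_counts arr)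

-- ===== LEMMAS AND PROOFS =====

-- "count[s] = count.get(s, 0) + v", the update both inner loops perform
def pvUpd (d : PySem.Dict String Int) (s : String) (v : Int) : PySem.Dict String Int :=
  d.insert s (d.getD s 0 + v)

-- the suffix strings B builds from running suffix s over the remaining reversed components
def pvScan : List String → String → List String
  | [], _ => []
  | c :: rs, s => (c ++ "." ++ s) :: pvScan rs (c ++ "." ++ s)

-- ".".join at String level
def pvJ (l : List String) : String := PySem.Str.join "." l

-- the canonical per-key update list after the full key, shared by both inner loops
def pvCList (path : List String) : List String :=
  match path.tail.reverse with
  | [] => []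
  | c :: rs => c :: pvScan rs c

theorem pvJ_singleton (a : String) : pvJ [a] = a := by
  apply String.toList_inj.mp
  simp [pvJ, PySem.Str.toList_join, PySem.Chars.join_singleton]

theorem pvJ_cons (a : String) (l : List String) (h : l ≠ []) : pvJ (a :: l) = a ++ "." ++ pvJ l := by
  apply String.toList_inj.mp
  obtain ⟨b, bs, rfl⟩ := List.exists_cons_of_ne_nil h
  simp [pvJ, PySem.Str.toList_join, PySem.Chars.join_cons_cons]

theorem pv_joinAux (sep : List Char) (xs : List (List Char)) (p : List Char) :
    PySem.Chars.join sep (xs ++ [p]) =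
      PySem.Chars.join sep xs ++ (if xs.isEmpty then [] else sep) ++ p := by
  induction xs with
  | nil => simp [PySem.Chars.join_nil, PySem.Chars.join_singleton]
  | cons q qs ih =>
    cases qs with
    | nil => simp [PySem.Chars.join_cons_cons, PySem.Chars.join_singleton]
    | cons r rs =>
      simp only [List.cons_append] at ih ⊢
      rw [PySem.Chars.join_cons_cons, ih, PySem.Chars.join_cons_cons]
      simp

-- join over splitOn.go (fuel bound as in splitOn's initial call)
theorem pv_go_join (sep : List Char) (hsep : sep ≠ []) :
    ∀ (fuel : Nat) (l cur : List Char) (acc : List (List Char)), l.length < fuel →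
      PySem.Chars.join sep (PySem.Chars.splitOn.go sep fuel l cur acc) =
        PySem.Chars.join sep acc.reverse ++ (if acc.isEmpty then [] else sep) ++ cur.reverse ++ l := by
  intro fuel
  induction fuel with
  | zero => intro l cur acc h; omega
  | succ n ih =>
    intro l cur acc h
    cases l with
    | nil =>
      rw [PySem.Chars.splitOn.go]
      · rw [List.reverse_cons, pv_joinAux]
        simp
      · omega
    | cons c rest =>
      rw [PySem.Chars.splitOn.go]
      split
      · rename_i hpre
        have hp : sep <+: (c :: rest) := (PySem.Chars.startswith_iff _ sep).mp hpre
        have hlensep : 0 < sep.length := List.length_pos_of_ne_nil hsep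
        have hlen : (List.drop sep.length (c :: rest)).length < n := by
          have := hp.length_le
          simp at h ⊢
          omega
        rw [ih _ _ _ hlen]
        have hl : sep ++ List.drop sep.length (c :: rest) = c :: rest :=
          List.prefix_iff_eq_append.mp hp
        rw [List.reverse_cons, pv_joinAux]
        simp only [List.isEmpty_cons, List.isEmpty_reverse]
        conv_rhs => rw [← hl]
        simp [List.append_assoc]
      · rw [ih _ _ _ (by simp at h ⊢; omega)]
        simp

theorem pv_go_ne_nil (sep : List Char) :
    ∀ (fuel : Nat) (l cur : List Char) (acc : List (List Char)),
      PySem.Chars.splitOn.go sep fuel l cur acc ≠ [] := by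
  intro fuel
  induction fuel with
  | zero => intro l cur acc; rw [PySem.Chars.splitOn.go]; simp
  | succ n ih =>
    intro l cur acc
    cases l with
    | nil =>
      rw [PySem.Chars.splitOn.go]
      · simp
      · omega
    | cons c rest =>
      rw [PySem.Chars.splitOn.go]
      split
      · exact ih _ _ _
      · exact ih _ _ _

-- split/join roundtrip: ".".join(key.split(".")) == key
theorem pv_roundtrip (key : String) : pvJ (pySplitDot key) = key := by
  apply String.toList_inj.mp
  rw [pvJ, pySplitDot, PySem.Str.toList_join]
  rw [List.map_map]
  have : (String.toList ∘ String.ofList) = id := by funext l; simp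
  rw [this, List.map_id]
  have h := pv_go_join ['.'] (by simp) (key.toList.length + 1) key.toList [] [] (by omega)
  rw [PySem.Chars.splitOn] at *
  simpa using h

theorem pySplitDot_ne_nil (key : String) : pySplitDot key ≠ [] := by
  rw [pySplitDot, PySem.Chars.splitOn]
  simp [pv_go_ne_nil]

-- the A-side branch is exactly pvUpd
theorem pv_branch_eq_upd (count : PySem.Dict String Int) (s : String) (v : Int) :
    (if count.contains s then count.insert s (count.getD s 0 + v) else count.insert s v) =
      pvUpd count s v := by
  rw [pvUpd]
  by_cases h : count.contains s
  · simp [h]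
  · simp only [Bool.not_eq_true] at h
    rw [if_neg (by simp [h]), PySem.Dict.getD_of_not_contains _ _ h]
    simp

-- B's inner fold, once the suffix is a string, is a pvUpd fold over pvScan
theorem pv_fold_some (v : Int) :
    ∀ (rs : List String) (counts : PySem.Dict String Int) (s0 : String),
      ∃ o, rs.foldl (fun (st : PySem.Dict String Int × Option String) c =>
          let suffix := match st.2 with | none => c | some s0 => c ++ "." ++ s0
          (st.1.insert suffix (st.1.getD suffix 0 + v), some suffix)) (counts, some s0) =
        ((pvScan rs s0).foldl (fun d t => pvUpd d t v) counts, o) := by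
  intro rs
  induction rs with
  | nil => intro counts s0; exact ⟨some s0, by simp [pvScan]⟩
  | cons c rs ih =>
    intro counts s0
    simp only [List.foldl_cons, pvScan]
    obtain ⟨o, ho⟩ := ih (counts.insert (c ++ "." ++ s0) (counts.getD (c ++ "." ++ s0) 0 + v)) (c ++ "." ++ s0)
    exact ⟨o, by rw [ho]; simp [pvUpd]⟩

-- pvScan from a joined seed enumerates joins of reversed takes
theorem pvScan_J : ∀ (rs w : List String), w ≠ [] →
    pvScan rs (pvJ w) =
      (List.range rs.length).map (fun j => pvJ (((rs.take (j + 1)).reverse) ++ w)) := by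
  intro rs
  induction rs with
  | nil => intro w h; simp [pvScan]
  | cons c rs ih =>
    intro w h
    rw [pvScan, ← pvJ_cons c w h, ih (c :: w) (by simp)]
    rw [List.length_cons, List.range_succ_eq_map, List.map_cons, List.map_map]
    refine congrArg₂ List.cons ?_ ?_
    · simp
    · apply List.map_congr_left
      intro j hj
      simp [Function.comp, List.take_succ_cons, List.reverse_cons, List.append_assoc]

theorem pv_core (u : List String) :
    (List.range u.length).map (fun k => pvJ ((u.take (k + 1)).reverse)) =
      (match u with | [] => [] | c :: rs => c :: pvScan rs c) := by
  cases u with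
  | nil => simp
  | cons c rs =>
    have h2 := pvScan_J rs [c] (by simp)
    rw [pvJ_singleton] at h2
    show _ = c :: pvScan rs c
    rw [h2, List.length_cons, List.range_succ_eq_map, List.map_cons, List.map_map]
    refine congrArg₂ List.cons ?_ ?_
    · simp [pvJ_singleton]
    · apply List.map_congr_left
      intro j hj
      simp [Function.comp, List.take_succ_cons, List.reverse_cons]

-- A's inner loop = pvUpd fold over (full key's join) :: pvCList
theorem pvA_inner (path : List String) (hp : path ≠ []) (count : PySem.Dict String Int) (v : Int) :
    (PySem.List.pyRange 0 (path.length : Int)).foldl (fun count_arr i =>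
        let s := PySem.Str.join "." (PySem.List.slice path (some (-i)) none)
        if count_arr.contains s then count_arr.insert s (count_arr.getD s 0 + v)
        else count_arr.insert s v) count =
      (pvJ path :: pvCList path).foldl (fun d t => pvUpd d t v) count := by
  obtain ⟨p0, t, rfl⟩ := List.exists_cons_of_ne_nil hp
  rw [PySem.List.pyRange_zero_natCast, List.foldl_map]
  rw [List.length_cons, List.range_succ_eq_map, List.foldl_cons, List.foldl_map]
  simp only [Nat.cast_zero, neg_zero, PySem.List.slice_zero_start, PySem.List.slice_none_none]
  rw [List.foldl_cons]
  rw [pv_branch_eq_upd count (PySem.Str.join "." (p0 :: t)) v]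
  have hJ : PySem.Str.join "." (p0 :: t) = pvJ (p0 :: t) := rfl
  rw [hJ]
  have hCL : pvCList (p0 :: t) =
      (List.range t.length).map (fun k => pvJ (((t.reverse).take (k + 1)).reverse)) := by
    rw [pvCList]
    simp only [List.tail_cons]
    have := pv_core t.reverse
    simp only [List.length_reverse] at this
    rw [this]
  rw [hCL, List.foldl_map]
  apply PySem.List.foldl_congr_mem
  intro acc k hk
  simp only [List.mem_range] at hk
  have h1 : PySem.List.slice (p0 :: t) (some (-(↑(k + 1) : Int))) none =
      List.drop (t.length - (k + 1)) t := by
    rw [PySem.List.slice_from_neg_natCast _ (k+1) (by omega)]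
    have : (p0 :: t).length - (k + 1) = (t.length - (k + 1)) + 1 := by simp; omega
    rw [this, List.drop_succ_cons]
  have h2 : ((t.reverse).take (k + 1)).reverse = List.drop (t.length - (k + 1)) t := by
    rw [List.take_reverse, List.reverse_reverse]
  simp only [Nat.succ_eq_add_one, h1, h2]
  exact pv_branch_eq_upd acc _ v

-- B's inner body = pvUpd fold over key :: pvCList
theorem pvB_inner (key : String) (count : PySem.Dict String Int) (v : Int) :
    (((PySem.List.slice (pySplitDot key) (some 1) none).reverse).foldl
        (fun (st : PySem.Dict String Int × Option String) c =>
          let suffix := match st.2 with | none => c | some s0 => c ++ "." ++ s0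
          (st.1.insert suffix (st.1.getD suffix 0 + v), some suffix))
        (count.insert key (count.getD key 0 + v), none)).1 =
      (key :: pvCList (pySplitDot key)).foldl (fun d t => pvUpd d t v) count := by
  rw [PySem.List.slice_from_one, List.foldl_cons]
  cases h : (pySplitDot key).tail.reverse with
  | nil =>
    rw [pvCList, h]
    simp [pvUpd]
  | cons c rs =>
    rw [pvCList, h]
    rw [List.foldl_cons]
    obtain ⟨o, ho⟩ := pv_fold_some v rs
      ((count.insert key (count.getD key 0 + v)).insert c
        ((count.insert key (count.getD key 0 + v)).getD c 0 + v)) c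
    simp only [List.foldl_cons]
    rw [ho]
    simp [pvUpd]

-- ===== VERDICT (by name: the statement is the Claim_ definition above) =====
theorem hit_counts_spec : Claim_equal_hit_counts := by
  intro arr _
  unfold Spec_hit_counts
  simp only [hit_counts, hit_counts_alt]
  have hnd : (pyDictOf arr).keys.Nodup := by
    rw [pyDictOf]
    exact PySem.Dict.nodup_keys_foldl_insert_key arr Prod.fst (fun _ p => p.2) _
      (by simp [PySem.Dict.empty, PySem.Dict.keys_mk])
  congr 1
  apply PySem.List.foldl_congr_mem
  intro count kv hkv
  have hv : (pyDictOf arr).getD kv.1 0 = kv.2 := by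
    have hm : (kv.1, kv.2) ∈ (pyDictOf arr).items := by cases kv; exact hkv
    exact PySem.Dict.getD_of_mem_items _ hm hnd 0
  simp only [hv]
  rw [pvA_inner (pySplitDot kv.1) (pySplitDot_ne_nil kv.1) count kv.2]
  rw [pv_roundtrip kv.1]
  exact (pvB_inner kv.1 count kv.2).symm
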